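-- pv_equiv track=rewrite | github.com/lhxxl85/Xcel-HeatPump | hp_rtu_tui.py | extract_registers
-- ===== SOURCE A (Python) =====
-- from typing import Dict, Iterable, List, Mapping, Tuple
--
-- def extract_registers(
--     start_address: int,
--     values: Iterable[int],
--     register_map: Mapping[int, str],
-- ) -> Dict[str, int]:
--     result: Dict[str, int] = {}
--     for offset, value in enumerate(values or []):
--         addr = start_address + offset
--         name = register_map.get(addr)
--         if name is not None:
--             result[name] = value
--     return result
-- ===== SOURCE B (Python) =====
-- def extract_registers(start_address, values, register_map):
--     lst = list(values or [])
--     return {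
--         register_map[addr]: lst[addr - start_address]
--         for addr in sorted(register_map)
--         if 0 <= addr - start_address < len(lst)
--     }
-- ===== Notes on version B (the rewrite author's own statement) =====
-- stated objective: alternative
-- what changed: B iterates over the register map's addresses (sorted ascending) and indexes into the materialized values list, instead of A's scan over values with a dict lookup per element; the result is built by a dict comprehension.
import Mathlib
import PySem

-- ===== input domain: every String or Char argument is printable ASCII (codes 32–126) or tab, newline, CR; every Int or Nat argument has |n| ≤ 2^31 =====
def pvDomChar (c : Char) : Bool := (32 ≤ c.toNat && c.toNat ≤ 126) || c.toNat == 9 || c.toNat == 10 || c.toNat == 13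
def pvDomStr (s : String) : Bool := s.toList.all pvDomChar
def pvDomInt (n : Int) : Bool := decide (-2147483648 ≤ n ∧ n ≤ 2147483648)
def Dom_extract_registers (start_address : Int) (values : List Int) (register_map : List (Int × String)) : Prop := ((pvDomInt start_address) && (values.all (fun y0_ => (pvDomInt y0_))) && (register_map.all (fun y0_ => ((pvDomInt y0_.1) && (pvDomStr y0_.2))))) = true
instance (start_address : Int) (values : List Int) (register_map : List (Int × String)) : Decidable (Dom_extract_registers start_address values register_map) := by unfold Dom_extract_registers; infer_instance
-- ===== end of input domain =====

-- B replaces A's scan over `values` (dict lookup per element) by a loop over the map's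
-- addresses sorted ascending, indexing into the materialized values list (alternative decomposition).

-- ===== PORT A =====
def extract_registers (start_address : Int) (values : List Int) (register_map : List (Int × String)) : List (String × Int) :=
  let rm : PySem.Dict Int String := PySem.Dict.ofList register_map
  (((PySem.List.enumerate (if values = [] then [] else values) 0)).foldl
    (fun (result : PySem.Dict String Int) iv =>
      match rm.get? (start_address + iv.1) with
      | some name => result.insert name iv.2
      | none => result) PySem.Dict.empty).items

-- ===== PORT B =====
def extract_registers_alt (start_address : Int) (values : List Int) (register_map : List (Int × String)) : List (String × Int) :=
  let lst := if values = [] then [] else values       -- lst = list(values or [])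
  let rm : PySem.Dict Int String := PySem.Dict.ofList register_map
  ((PySem.List.sorted rm.keys (fun k => k) false).foldl
    (fun (acc : PySem.Dict String Int) addr =>
      if 0 ≤ addr - start_address ∧ addr - start_address < (lst.length : Int) then
        match rm.get? addr with    -- register_map[addr]; addr ∈ keys so the none (KeyError) branch is unreachable
        | some name => acc.insert name (PySem.List.pyGetD lst (addr - start_address) 0)  -- index proven in range by the guard
        | none => acc
      else acc) PySem.Dict.empty).items

-- ===== PRECONDITION & SPEC =====
def Spec_extract_registers (start_address : Int) (values : List Int) (register_map : List (Int × String)) (out : List (String × Int)) : Prop := out = extract_registers_alt start_address values register_map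
instance (start_address : Int) (values : List Int) (register_map : List (Int × String)) (out : List (String × Int)) : Decidable (Spec_extract_registers start_address values register_map out) := by unfold Spec_extract_registers; infer_instance

-- ===== CLAIM (what is proved, stated in full; the proofs are below) =====
def Claim_equal_extract_registers : Prop := ∀ (start_address : Int) (values : List Int) (register_map : List (Int × String)), Dom_extract_registers start_address values register_map → Spec_extract_registers start_address values register_map (extract_registers start_address values register_map)

-- ===== LEMMAS AND PROOFS =====

-- a fold that inserts when f fires is the insert-fold over the filterMap of f
theorem foldl_option_insert {α : Type} (f : α → Option (String × Int)) (l : List α)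
    (d : PySem.Dict String Int) :
    l.foldl (fun r x => match f x with | some p => r.insert p.1 p.2 | none => r) d
      = (l.filterMap f).foldl (fun (r : PySem.Dict String Int) (p : String × Int) => r.insert p.1 p.2) d := by
  induction l generalizing d with
  | nil => rfl
  | cons x t ih =>
      cases hfx : f x <;> simp [List.foldl_cons, hfx, ih]

-- filtering to the inputs where f fires does not change a filterMap
theorem filterMap_filter_isSome {α β : Type} (f : α → Option β) (l : List α) :
    (l.filter (fun a => (f a).isSome)).filterMap f = l.filterMap f := by
  induction l with
  | nil => rfl
  | cons x t ih =>
      cases hfx : f x <;> simp [hfx, ih]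

theorem extract_registers_spec' (start_address : Int) (values : List Int)
    (register_map : List (Int × String)) :
    extract_registers start_address values register_map
      = extract_registers_alt start_address values register_map := by
  set s := start_address
  set lst := if values = [] then [] else values with hlst
  have hlv : lst = values := by rw [hlst]; split <;> simp_all
  set rm : PySem.Dict Int String := PySem.Dict.ofList register_map with hrm
  set n : Int := (lst.length : Int) with hn
  -- the common per-address worker
  set g : Int → Option (String × Int) :=
    fun a => (rm.get? a).map (fun nm => (nm, PySem.List.pyGetD lst (a - s) 0)) with hg
  set K := PySem.List.sorted rm.keys (fun k => k) false with hK
  set J := (PySem.List.pyRange 0 n 1).map (fun j => s + j) with hJ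
  -- A's fold is the insert-fold over J.filterMap g
  have hA : extract_registers s values register_map
      = ((J.filterMap g).foldl (fun (r : PySem.Dict String Int) (p : String × Int) => r.insert p.1 p.2) PySem.Dict.empty).items := by
    show (((PySem.List.enumerate lst 0)).foldl
      (fun (result : PySem.Dict String Int) iv =>
        match rm.get? (s + iv.1) with
        | some name => result.insert name iv.2
        | none => result) PySem.Dict.empty).items = _
    have e1 : ((PySem.List.enumerate lst 0)).foldl
        (fun (result : PySem.Dict String Int) iv =>
          match rm.get? (s + iv.1) with
          | some name => result.insert name iv.2
          | none => result) PySem.Dict.empty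
        = ((PySem.List.enumerate lst 0)).foldl
          (fun (r : PySem.Dict String Int) iv => match (rm.get? (s + iv.1)).map (fun nm => ((nm, iv.2) : String × Int)) with
            | some p => r.insert p.1 p.2 | none => r) PySem.Dict.empty := by
      have ef : (fun (result : PySem.Dict String Int) (iv : Int × Int) =>
          match rm.get? (s + iv.1) with
          | some name => result.insert name iv.2
          | none => result)
          = (fun (r : PySem.Dict String Int) (iv : Int × Int) =>
            match (rm.get? (s + iv.1)).map (fun nm => ((nm, iv.2) : String × Int)) with
            | some p => r.insert p.1 p.2 | none => r) := by
        funext r iv; cases rm.get? (s + iv.1) <;> rfl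
      rw [ef]
    rw [e1, foldl_option_insert]
    congr 2
    rw [PySem.List.enumerate_eq_map_pyRange lst 0, List.filterMap_map]
    have hlen : PySem.List.len lst = n := rfl
    rw [hlen, hJ, List.filterMap_map]
    apply List.filterMap_congr
    intro j _
    simp only [Function.comp, hg]
    have : s + j - s = j := by ring
    rw [this]
  -- B's fold is the insert-fold over (K.filter in-range).filterMap g
  have hB : extract_registers_alt s values register_map
      = (((K.filter (fun a => decide (0 ≤ a - s ∧ a - s < n))).filterMap g).foldl
          (fun (r : PySem.Dict String Int) (p : String × Int) => r.insert p.1 p.2) PySem.Dict.empty).items := by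
    show ((K.foldl
      (fun (acc : PySem.Dict String Int) addr =>
        if 0 ≤ addr - s ∧ addr - s < n then
          match rm.get? addr with
          | some name => acc.insert name (PySem.List.pyGetD lst (addr - s) 0)
          | none => acc
        else acc) PySem.Dict.empty)).items = _
    have e1 : ∀ (l : List Int) (d : PySem.Dict String Int),
        l.foldl (fun acc addr =>
          if 0 ≤ addr - s ∧ addr - s < n then
            match rm.get? addr with
            | some name => acc.insert name (PySem.List.pyGetD lst (addr - s) 0)
            | none => acc
          else acc) d
        = ((l.filter (fun a => decide (0 ≤ a - s ∧ a - s < n))).filterMap g).foldl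
            (fun (r : PySem.Dict String Int) (p : String × Int) => r.insert p.1 p.2) d := by
      intro l
      induction l with
      | nil => intro d; rfl
      | cons x t ih =>
          intro d
          by_cases hc : 0 ≤ x - s ∧ x - s < n
          · have hdc : decide (0 ≤ x - s ∧ x - s < n) = true := decide_eq_true hc
            cases hx : rm.get? x with
            | some name =>
                simp only [List.foldl_cons, List.filter_cons, hdc, if_pos hc, hx,
                  List.filterMap_cons, hg, Option.map_some, if_true]
                exact ih _
            | none =>
                simp only [List.foldl_cons, List.filter_cons, hdc, if_pos hc, hx,
                  List.filterMap_cons, hg, Option.map_none, if_true]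
                exact ih _
          · have hdc : decide (0 ≤ x - s ∧ x - s < n) = false := decide_eq_false hc
            simp only [List.foldl_cons, List.filter_cons, hdc, if_neg hc,
              Bool.false_eq_true, if_false]
            exact ih _
    rw [e1]
  -- the two index lists filtered to where g fires coincide
  have hfire : ∀ a : Int, (g a).isSome = rm.contains a := by
    intro a; rw [PySem.Dict.contains_eq_isSome_get?, hg]; simp
  have hJK : J.filter (fun a => (g a).isSome)
      = (K.filter (fun a => decide (0 ≤ a - s ∧ a - s < n))).filter (fun a => (g a).isSome) := by
    apply List.Perm.eq_of_pairwise (le := fun a b => a < b)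
    · intro a b _ _ h1 h2; exact absurd h1 (not_lt.mpr h2.le)
    · exact List.Pairwise.filter _
        ((PySem.List.pairwise_lt_pyRange_one 0 n).map _ (by intro a b h; omega))
    · refine List.Pairwise.filter _ (List.Pairwise.filter _ ?_)
      have hsorted := PySem.List.sorted_pairwise rm.keys (fun k => k)
      have hnodupK : K.Nodup :=
        (PySem.List.sorted_perm rm.keys (fun k => k) false).nodup_iff.mpr
          (by rw [hrm]; exact PySem.Dict.nodup_keys_ofList register_map)
      exact (hsorted.and hnodupK).imp (fun h => lt_of_le_of_ne h.1 h.2)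
    · -- same members
      have hnodupJ : (J.filter (fun a => (g a).isSome)).Nodup :=
        (List.Pairwise.filter _ ((PySem.List.pairwise_lt_pyRange_one 0 n).map _
          (by intro a b h; omega))).imp (fun h => ne_of_lt h)
      have hnodupK2 : ((K.filter (fun a => decide (0 ≤ a - s ∧ a - s < n))).filter
          (fun a => (g a).isSome)).Nodup := by
        refine List.Nodup.filter _ (List.Nodup.filter _ ?_)
        exact (PySem.List.sorted_perm rm.keys (fun k => k) false).nodup_iff.mpr
          (by rw [hrm]; exact PySem.Dict.nodup_keys_ofList register_map)
      rw [List.perm_ext_iff_of_nodup hnodupJ hnodupK2]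
      intro a
      simp only [List.mem_filter, hJ, List.mem_map, hfire]
      constructor
      · rintro ⟨⟨j, hj, rfl⟩, hc⟩
        rw [PySem.List.mem_pyRange_one] at hj
        refine ⟨⟨?_, by simp; omega⟩, hc⟩
        rw [hK, PySem.List.mem_sorted, ← PySem.Dict.contains_iff_mem_keys]
        exact hc
      · rintro ⟨⟨hk, hrange⟩, hc⟩
        simp at hrange
        exact ⟨⟨a - s, by rw [PySem.List.mem_pyRange_one]; omega, by ring⟩, hc⟩
  rw [hA, hB, ← filterMap_filter_isSome g J,
      ← filterMap_filter_isSome g (K.filter (fun a => decide (0 ≤ a - s ∧ a - s < n))), hJK]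

-- ===== VERDICT (by name: the statement is the Claim_ definition above) =====
theorem extract_registers_spec : Claim_equal_extract_registers := by
  intro s vs rm _
  exact extract_registers_spec' s vs rm
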